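-- pv_equiv track=rewrite | github.com/snellestijn/mastermind | worstcase.py | frequentielijst
-- ===== SOURCE A (Python) =====
-- def geef_feedback(code, guess):
--
--     # Zet de gok om naar een lijst
--     guess = list(guess)
--
--     # De code om de gok mee te vergelijken
--     kopie_code = list(code)
--
--     # Juiste kleur op de juiste positie
--     helemaal_goed = 0
--
--     # Juiste kleur op de verkeerde positie
--     juiste_kleur = 0
--
--     # Loop over de code om de juiste kleur verkeerde positie te bepalen
--     for i in range(4):
--
--         # Exacte match?
--         if (kopie_code[i] == guess[i]):
--             # Een match qua kleur en positie
--             helemaal_goed += 1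
--
--             # Vervang het stukje code, zodat we deze niet
--             # als juiste kleur verkeerde positie kunnen markeren
--             kopie_code[i] = '-'
--             guess[i] = ''
--
--
--     # Nu we alle juiste eruit gefilterd hebben kunnen we kijken
--     # naar wat nog op de verkeerde plek staat.
--     for i in range(4):
--
--         # Zit de kleur ergens anders in de code
--         if guess[i] in kopie_code:
--
--             # Verhoog de counter
--             juiste_kleur += 1
--
--             # Vervang het element, zodat we geen dubbele feedback krijgen
--             kopie_code[kopie_code.index(guess[i])] = '-'
--             guess[i] = ''
--
--     return (helemaal_goed, juiste_kleur)
--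
-- def frequentielijst(mogelijkheden,gok):
--     #lijst aanmaken
--     lijst = dict()
--     #loop over elk element
--     for element in mogelijkheden:
--         #feedback als variabelen opslaan
--         fb = geef_feedback(element,gok)
--         #als de feedback nog niet bestond in de lijst
--         if fb not in lijst:
--             #toevoegen aan de lijst
--             lijst[fb] = 1
--         #anders
--         else: #een maal toevoegen aan de teller
--             lijst[fb] += 1
--     hoogste = int()
--     #loop over de feedbacks heen
--     for ele in lijst:
--         #als een feedback vaker voorkomt dan de meest voorkomende
--         if lijst [ele] > hoogste:
--             #dan is dan de nieuwe hoogste feedback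
--             hoogste = lijst[ele]
--     return hoogste
-- ===== SOURCE B (Python) =====
-- def geef_feedback(code, guess):
--     # pool of available code colours
--     code_rem = {}
--     for c in code:
--         code_rem[c] = code_rem.get(c, 0) + 1
--     # walk the four pegs: exact matches consume their colour from the pool,
--     # the remaining guessed colours are collected for the colour-only count
--     helemaal_goed = 0
--     guess_rem = {}
--     for i in range(4):
--         if code[i] == guess[i]:
--             helemaal_goed += 1
--             code_rem[code[i]] -= 1
--         else:
--             g = guess[i]
--             guess_rem[g] = guess_rem.get(g, 0) + 1
--     # colour-only matches = size of the multiset intersection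
--     juiste_kleur = sum(min(k, code_rem.get(c, 0)) for c, k in guess_rem.items())
--     return (helemaal_goed, juiste_kleur)
--
-- def frequentielijst(mogelijkheden, gok):
--     counts = {}
--     for e in mogelijkheden:
--         fb = geef_feedback(e, gok)
--         counts[fb] = counts.get(fb, 0) + 1
--     return max(counts.values(), default=0)
-- ===== Notes on version B (the rewrite author's own statement) =====
-- stated objective: idiomatic
-- what changed: geef_feedback's sequential find-and-remove scan over a mutated list copy of the code is replaced by a multiset computation (build a counter of the code colours, consume exact matches from it while collecting the remaining guessed colours, then sum per-colour minima), and the manual dict/max loops are replaced by a get-default counter and max(values, default=0); Pre_ excludes inputs where A raises IndexError (strings shorter than 4) and guesses containing A's internal '-' sentinel in the first four positions, where A's double-counting feedback is an implementation artefact. …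
-- outside the precondition, e.g. on frequentielijst(['---b', '-bbb'], 'a-b-'): A returns 2, B returns 1
import Mathlib
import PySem

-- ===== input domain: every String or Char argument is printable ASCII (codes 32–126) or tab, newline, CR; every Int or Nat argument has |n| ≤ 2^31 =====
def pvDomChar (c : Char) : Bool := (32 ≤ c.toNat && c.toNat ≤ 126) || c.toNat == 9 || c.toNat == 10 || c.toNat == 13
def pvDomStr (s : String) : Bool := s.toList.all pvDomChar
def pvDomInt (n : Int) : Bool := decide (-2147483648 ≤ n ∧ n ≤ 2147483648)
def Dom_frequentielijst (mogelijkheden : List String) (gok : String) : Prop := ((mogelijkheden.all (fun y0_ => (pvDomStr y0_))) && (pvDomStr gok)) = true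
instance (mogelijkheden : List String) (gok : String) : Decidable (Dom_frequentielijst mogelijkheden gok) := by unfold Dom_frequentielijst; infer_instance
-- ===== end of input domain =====

-- B replaces A's find-and-remove feedback scan by a multiset (per-colour minimum) computation and
-- the manual histogram/max loops by a get-default counter with max(values, default=0); same results, idiomatic.


-- ===== PORT A =====
-- geef_feedback, first loop: exact matches, mutating kopie_code/guess in place
def pvStep1 (st : List String × List String × Int) (i : Int) : List String × List String × Int :=
  match PySem.List.pyGet? st.1 i, PySem.List.pyGet? st.2.1 i with
  | some kc, some gc =>
      if kc = gc then (PySem.List.pySetD st.1 i "-", PySem.List.pySetD st.2.1 i "", st.2.2 + 1)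
      else st
  | _, _ => st

-- geef_feedback, second loop: colour-only matches via find-and-remove
def pvStep2 (st : List String × List String × Int) (i : Int) : List String × List String × Int :=
  match PySem.List.pyGet? st.2.1 i with
  | some gc =>
      if st.1.contains gc then
        match PySem.List.index? st.1 gc with
        | some j => (st.1.set j "-", PySem.List.pySetD st.2.1 i "", st.2.2 + 1)
        | none => st
      else st
  | none => st

def pvGfA (code gok : String) : Int × Int :=
  let guess0 : List String := gok.toList.map (fun c => String.ofList [c])
  let kopie0 : List String := code.toList.map (fun c => String.ofList [c])
  let s1 := (PySem.List.pyRange 0 4 1).foldl pvStep1 (kopie0, guess0, 0)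
  let s2 := (PySem.List.pyRange 0 4 1).foldl pvStep2 (s1.1, s1.2.1, 0)
  (s1.2.2, s2.2.2)

def frequentielijst (mogelijkheden : List String) (gok : String) : Int :=
  let lijst := mogelijkheden.foldl (fun (d : PySem.Dict (Int × Int) Int) element =>
    let fb := pvGfA element gok
    match d.get? fb with
    | none => d.insert fb 1
    | some v => d.insert fb (v + 1)) PySem.Dict.empty
  -- Python's `lijst[ele]` cannot raise: `ele` ranges over the dict's own keys; ported as getD 0 (exact here)
  lijst.keys.foldl (fun hoogste ele => if lijst.getD ele 0 > hoogste then lijst.getD ele 0 else hoogste) 0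

-- ===== PORT B =====
-- the peg loop: an exact match consumes its colour from the code pool (`code_rem[code[i]] -= 1`,
-- exact here since the key is always present under Pre_), a mismatch collects the guessed colour
def pvStepB (cs gs : List Char) (st : PySem.Dict Char Int × PySem.Dict Char Int × Int) (i : Int) :
    PySem.Dict Char Int × PySem.Dict Char Int × Int :=
  match PySem.List.pyGet? cs i, PySem.List.pyGet? gs i with
  | some c, some g =>
      if c = g then (st.1.insert c (st.1.getD c 0 - 1), st.2.1, st.2.2 + 1)
      else (st.1, st.2.1.insert g (st.2.1.getD g 0 + 1), st.2.2)
  | _, _ => st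

def pvGfB (code gok : String) : Int × Int :=
  let cs := code.toList
  let gs := gok.toList
  let codeRem0 := cs.foldl (fun (d : PySem.Dict Char Int) c => d.insert c (d.getD c 0 + 1)) PySem.Dict.empty
  let st := (PySem.List.pyRange 0 4 1).foldl (pvStepB cs gs) (codeRem0, PySem.Dict.empty, 0)
  let juisteKleur := st.2.1.items.foldl (fun (acc : Int) p => acc + min p.2 (st.1.getD p.1 0)) 0
  (st.2.2, juisteKleur)

def frequentielijst_alt (mogelijkheden : List String) (gok : String) : Int :=
  let counts := mogelijkheden.foldl (fun (d : PySem.Dict (Int × Int) Int) e =>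
    let fb := pvGfB e gok
    d.insert fb (d.getD fb 0 + 1)) PySem.Dict.empty
  match PySem.List.max? counts.values (fun v => v) with
  | none => 0
  | some v => v

-- ===== PRECONDITION & SPEC =====
-- Pre_ excludes (i) inputs where A raises IndexError (a nonempty list of possibilities with the guess or
-- some possibility shorter than 4 characters), and (ii) guesses whose first four characters contain '-',
-- which A uses internally as a sentinel for consumed pegs, so its feedback there (a peg can be counted
-- both as an exact and as a colour match) is an artefact of the implementation; B treats '-' as an
-- ordinary colour there.
def Pre_frequentielijst (mogelijkheden : List String) (gok : String) : Prop :=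
  mogelijkheden = [] ∨
    (4 ≤ gok.toList.length ∧ (∀ e ∈ mogelijkheden, 4 ≤ e.toList.length) ∧ '-' ∉ gok.toList.take 4)
instance (mogelijkheden : List String) (gok : String) : Decidable (Pre_frequentielijst mogelijkheden gok) := by
  unfold Pre_frequentielijst; infer_instance

def pvWitness_frequentielijst : List String × String := (["abcd", "abca", "ddcb"], "abdc")

def Spec_frequentielijst (mogelijkheden : List String) (gok : String) (out : Int) : Prop := out = frequentielijst_alt mogelijkheden gok
instance (mogelijkheden : List String) (gok : String) (out : Int) : Decidable (Spec_frequentielijst mogelijkheden gok out) := by unfold Spec_frequentielijst; infer_instance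

-- ===== CLAIM (what is proved, stated in full; the proofs are below) =====
def Claim_equal_frequentielijst : Prop := ∀ (mogelijkheden : List String) (gok : String), Dom_frequentielijst mogelijkheden gok → Pre_frequentielijst mogelijkheden gok → Spec_frequentielijst mogelijkheden gok (frequentielijst mogelijkheden gok)

-- ===== LEMMAS AND PROOFS =====

def sOf (c : Char) : String := String.ofList [c]
@[simp] lemma sOf_eq_iff (a b : Char) : sOf a = sOf b ↔ a = b := by
  constructor
  · intro h; have := congrArg String.toList h; simpa [sOf] using this
  · intro h; rw [h]
@[simp] lemma sOf_ne_empty (c : Char) : ¬ sOf c = "" := by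
  intro h; have := congrArg String.toList h; simp [sOf] at this
lemma sOf_inj : Function.Injective sOf := by
  intro a b h
  exact (sOf_eq_iff a b).1 h
@[simp] lemma sOf_eq_dash_iff (c : Char) : sOf c = "-" ↔ c = '-' := by
  constructor
  · intro h
    have h2 : sOf c = sOf '-' := h
    exact (sOf_eq_iff c '-').1 h2
  · intro h; rw [h]; rfl


def pvGreedy : List String → List String → Nat
  | [], _ => 0
  | g :: t, K =>
      if K.contains g then pvGreedy t (K.set ((PySem.List.index? K g).getD 0) "-") + 1
      else pvGreedy t K


def mK : List Char → List Char → List String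
  | c :: cs, g :: gs => (if c = g then "-" else sOf c) :: mK cs gs
  | _, _ => []
def mG : List Char → List Char → List String
  | c :: cs, g :: gs => (if c = g then "" else sOf g) :: mG cs gs
  | _, _ => []
def mX : List Char → List Char → Int
  | c :: cs, g :: gs => (if c = g then 1 else 0) + mX cs gs
  | _, _ => 0
def mEx : List Char → List Char → List Char
  | c :: cs, g :: gs => (if c = g then [c] else []) ++ mEx cs gs
  | _, _ => []
def mRemC : List Char → List Char → List Char
  | c :: cs, g :: gs => (if c = g then [] else [c]) ++ mRemC cs gs
  | _, _ => []
def mRemG : List Char → List Char → List Char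
  | c :: cs, g :: gs => (if c = g then [] else [g]) ++ mRemG cs gs
  | _, _ => []

def insStep (d : PySem.Dict Char Int) (c : Char) : PySem.Dict Char Int :=
  d.insert c (d.getD c 0 + 1)
def decStep (d : PySem.Dict Char Int) (c : Char) : PySem.Dict Char Int :=
  d.insert c (d.getD c 0 - 1)

lemma set_len_append {α : Type} (pre suf : List α) (v w : α) :
    (pre ++ v :: suf).set pre.length w = pre ++ w :: suf := by
  induction pre with
  | nil => rfl
  | cons x xs ih => simp [ih]

lemma length_mG (cw gw : List Char) (h : cw.length = gw.length) : (mG cw gw).length = cw.length := by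
  induction cw generalizing gw with
  | nil => simp [mG]
  | cons c cs ih =>
    cases gw with
    | nil => simp at h
    | cons g gs => simp [mG, ih gs (by simpa using h)]

lemma mem_mG (cw gw : List Char) (x : String) (hx : x ∈ mG cw gw) :
    x = "" ∨ ∃ γ ∈ gw, x = sOf γ := by
  induction cw generalizing gw with
  | nil => simp [mG] at hx
  | cons c cs ih =>
    cases gw with
    | nil => simp [mG] at hx
    | cons g gs =>
      simp only [mG, List.mem_cons] at hx
      rcases hx with hx | hx
      · by_cases hcg : c = g
        · left; simpa [hcg] using hx
        · right; exact ⟨g, by simp, by simpa [hcg] using hx⟩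
      · rcases ih gs hx with h | ⟨γ, hγ, hh⟩
        · left; exact h
        · right; exact ⟨γ, by simp [hγ], hh⟩

lemma mem_mRemG (cw gw : List Char) (γ : Char) (hγ : γ ∈ mRemG cw gw) : γ ∈ gw := by
  induction cw generalizing gw with
  | nil => simp [mRemG] at hγ
  | cons c cs ih =>
    cases gw with
    | nil => simp [mRemG] at hγ
    | cons g gs =>
      simp only [mRemG, List.mem_append] at hγ
      rcases hγ with hγ | hγ
      · by_cases hcg : c = g
        · simp [hcg] at hγ
        · simp [hcg] at hγ; simp [hγ]
      · simp [ih gs hγ]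

lemma loop1_gen (fuel : Nat) : ∀ (Kpre Gpre : List String) (cw gw : List Char)
    (KR GR : List String) (h : Int),
    cw.length = fuel → gw.length = fuel → Kpre.length + fuel = 4 → Gpre.length = Kpre.length →
    (PySem.List.pyRange (Kpre.length : Int) 4 1).foldl pvStep1
        (Kpre ++ cw.map sOf ++ KR, Gpre ++ gw.map sOf ++ GR, h)
      = (Kpre ++ mK cw gw ++ KR, Gpre ++ mG cw gw ++ GR, h + mX cw gw) := by
  induction fuel with
  | zero =>
    intro Kpre Gpre cw gw KR GR h hcw hgw hlen hglen
    have hcw0 : cw = [] := List.eq_nil_of_length_eq_zero hcw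
    have hgw0 : gw = [] := List.eq_nil_of_length_eq_zero hgw
    have h4 : (Kpre.length : Int) = 4 := by omega
    subst hcw0 hgw0
    rw [h4]
    have : PySem.List.pyRange 4 4 1 = [] := by decide
    simp [this, mK, mG, mX]
  | succ f ih =>
    intro Kpre Gpre cw gw KR GR h hcw hgw hlen hglen
    obtain ⟨c, cs, rfl⟩ : ∃ c cs, cw = c :: cs := by
      cases cw with | nil => simp at hcw | cons a b => exact ⟨a, b, rfl⟩
    obtain ⟨g, gs, rfl⟩ : ∃ g gs, gw = g :: gs := by
      cases gw with | nil => simp at hgw | cons a b => exact ⟨a, b, rfl⟩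
    have hlt : (Kpre.length : Int) < 4 := by omega
    rw [PySem.List.pyRange_one_cons (by omega)]
    rw [List.foldl_cons]
    have hKassoc : Kpre ++ (c :: cs).map sOf ++ KR = Kpre ++ sOf c :: ((cs.map sOf) ++ KR) := by
      simp
    have hGassoc : Gpre ++ (g :: gs).map sOf ++ GR = Gpre ++ sOf g :: ((gs.map sOf) ++ GR) := by
      simp
    have hgetK : PySem.List.pyGet? (Kpre ++ (c :: cs).map sOf ++ KR) (Kpre.length : Int)
        = some (sOf c) := by
      rw [hKassoc]; exact PySem.List.pyGet?_append_length _ _ _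
    have hgetG : PySem.List.pyGet? (Gpre ++ (g :: gs).map sOf ++ GR) (Kpre.length : Int)
        = some (sOf g) := by
      rw [hGassoc, ← hglen]; exact PySem.List.pyGet?_append_length _ _ _
    by_cases hcg : c = g
    · have hstep : pvStep1 (Kpre ++ (c :: cs).map sOf ++ KR, Gpre ++ (g :: gs).map sOf ++ GR, h)
          (Kpre.length : Int)
          = ((Kpre ++ ["-"]) ++ cs.map sOf ++ KR, (Gpre ++ [""]) ++ gs.map sOf ++ GR, h + 1) := by
        simp only [pvStep1, hgetK, hgetG]
        rw [if_pos (by simp [hcg])]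
        have hsk : PySem.List.pySetD (Kpre ++ (c :: cs).map sOf ++ KR) (Kpre.length : Int) "-"
            = (Kpre ++ ["-"]) ++ cs.map sOf ++ KR := by
          rw [PySem.List.pySetD_of_nonneg _ _ (by omega), Int.toNat_natCast, hKassoc,
            set_len_append]
          simp
        have hsg : PySem.List.pySetD (Gpre ++ (g :: gs).map sOf ++ GR) (Kpre.length : Int) ""
            = (Gpre ++ [""]) ++ gs.map sOf ++ GR := by
          rw [PySem.List.pySetD_of_nonneg _ _ (by omega), Int.toNat_natCast, hGassoc, ← hglen,
            set_len_append]
          simp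
        rw [hsk, hsg]
      rw [hstep]
      have hlen1 : ((Kpre ++ ["-"]).length : Int) = (Kpre.length : Int) + 1 := by simp
      rw [show (Kpre.length : Int) + 1 = ((Kpre ++ ["-"]).length : Int) from hlen1.symm]
      rw [ih (Kpre ++ ["-"]) (Gpre ++ [""]) cs gs KR GR (h+1) (by simpa using hcw)
        (by simpa using hgw) (by simp; omega) (by simp [hglen])]
      simp [mK, mG, mX, hcg]
      ring
    · have hstep : pvStep1 (Kpre ++ (c :: cs).map sOf ++ KR, Gpre ++ (g :: gs).map sOf ++ GR, h)
          (Kpre.length : Int)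
          = ((Kpre ++ [sOf c]) ++ cs.map sOf ++ KR, (Gpre ++ [sOf g]) ++ gs.map sOf ++ GR, h) := by
        simp only [pvStep1, hgetK, hgetG]
        rw [if_neg (by simp [hcg])]
        simp
      rw [hstep]
      have hlen1 : ((Kpre ++ [sOf c]).length : Int) = (Kpre.length : Int) + 1 := by simp
      rw [show (Kpre.length : Int) + 1 = ((Kpre ++ [sOf c]).length : Int) from hlen1.symm]
      rw [ih (Kpre ++ [sOf c]) (Gpre ++ [sOf g]) cs gs KR GR h (by simpa using hcw)
        (by simpa using hgw) (by simp; omega) (by simp [hglen])]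
      simp [mK, mG, mX, hcg]

-- B's peg loop: exact matches decrement the code pool and bump the counter,
-- mismatches collect the guessed colour
lemma loopB_gen (fuel : Nat) : ∀ (cpre gpre cw gw crest grest : List Char)
    (dC dG : PySem.Dict Char Int) (h : Int),
    cw.length = fuel → gw.length = fuel → cpre.length + fuel = 4 → gpre.length = cpre.length →
    (PySem.List.pyRange (cpre.length : Int) 4 1).foldl
        (pvStepB (cpre ++ cw ++ crest) (gpre ++ gw ++ grest)) (dC, dG, h)
      = ((mEx cw gw).foldl decStep dC, (mRemG cw gw).foldl insStep dG, h + mX cw gw) := by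
  induction fuel with
  | zero =>
    intro cpre gpre cw gw crest grest dC dG h hcw hgw hlen hglen
    have hcw0 : cw = [] := List.eq_nil_of_length_eq_zero hcw
    have hgw0 : gw = [] := List.eq_nil_of_length_eq_zero hgw
    have h4 : (cpre.length : Int) = 4 := by omega
    subst hcw0 hgw0
    rw [h4]
    have : PySem.List.pyRange 4 4 1 = [] := by decide
    simp [this, mEx, mRemG, mX]
  | succ f ih =>
    intro cpre gpre cw gw crest grest dC dG h hcw hgw hlen hglen
    obtain ⟨c, cs, rfl⟩ : ∃ c cs, cw = c :: cs := by
      cases cw with | nil => simp at hcw | cons a b => exact ⟨a, b, rfl⟩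
    obtain ⟨g, gs, rfl⟩ : ∃ g gs, gw = g :: gs := by
      cases gw with | nil => simp at hgw | cons a b => exact ⟨a, b, rfl⟩
    rw [PySem.List.pyRange_one_cons (by omega), List.foldl_cons]
    have hgetC : PySem.List.pyGet? (cpre ++ (c :: cs) ++ crest) (cpre.length : Int)
        = some c := by
      rw [show cpre ++ (c :: cs) ++ crest = cpre ++ c :: (cs ++ crest) by simp]
      exact PySem.List.pyGet?_append_length _ _ _
    have hgetG : PySem.List.pyGet? (gpre ++ (g :: gs) ++ grest) (cpre.length : Int)
        = some g := by
      rw [show gpre ++ (g :: gs) ++ grest = gpre ++ g :: (gs ++ grest) by simp, ← hglen]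
      exact PySem.List.pyGet?_append_length _ _ _
    have hlen1 : ((cpre ++ [c]).length : Int) = (cpre.length : Int) + 1 := by simp
    have hCassoc : cpre ++ (c :: cs) ++ crest = (cpre ++ [c]) ++ cs ++ crest := by simp
    have hGassoc : gpre ++ (g :: gs) ++ grest = (gpre ++ [g]) ++ gs ++ grest := by simp
    by_cases hcg : c = g
    · have hstep : pvStepB (cpre ++ (c :: cs) ++ crest) (gpre ++ (g :: gs) ++ grest)
          (dC, dG, h) (cpre.length : Int) = (decStep dC c, dG, h + 1) := by
        simp only [pvStepB, hgetC, hgetG]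
        simp [hcg, decStep]
      rw [hstep]
      rw [show (cpre.length : Int) + 1 = ((cpre ++ [c]).length : Int) from hlen1.symm,
        hCassoc, hGassoc]
      rw [ih (cpre ++ [c]) (gpre ++ [g]) cs gs crest grest _ _ _ (by simpa using hcw)
        (by simpa using hgw) (by simp; omega) (by simp [hglen])]
      simp [mEx, mRemG, mX, hcg]
      ring
    · have hstep : pvStepB (cpre ++ (c :: cs) ++ crest) (gpre ++ (g :: gs) ++ grest)
          (dC, dG, h) (cpre.length : Int) = (dC, insStep dG g, h) := by
        simp only [pvStepB, hgetC, hgetG]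
        simp [hcg, insStep]
      rw [hstep]
      rw [show (cpre.length : Int) + 1 = ((cpre ++ [c]).length : Int) from hlen1.symm,
        hCassoc, hGassoc]
      rw [ih (cpre ++ [c]) (gpre ++ [g]) cs gs crest grest _ _ _ (by simpa using hcw)
        (by simpa using hgw) (by simp; omega) (by simp [hglen])]
      simp [mEx, mRemG, mX, hcg]

lemma getD_decStep_fold (l : List Char) : ∀ (d : PySem.Dict Char Int) (γ : Char),
    (l.foldl decStep d).getD γ 0 = d.getD γ 0 - (l.count γ : Int) := by
  induction l with
  | nil => intro d γ; simp
  | cons c cs ih =>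
    intro d γ
    rw [List.foldl_cons, ih]
    by_cases hcγ : γ = c
    · subst hcγ
      simp [decStep, PySem.Dict.getD_insert, List.count_cons]
      push_cast
      ring
    · have : ¬ c = γ := fun h => hcγ h.symm
      simp [decStep, PySem.Dict.getD_insert, hcγ, List.count_cons, this]

lemma count_mEx_mRemC (cw gw : List Char) (hl : cw.length = gw.length) (γ : Char) :
    cw.count γ = (mEx cw gw).count γ + (mRemC cw gw).count γ := by
  induction cw generalizing gw with
  | nil => simp [mEx, mRemC]
  | cons c cs ih =>
    cases gw with
    | nil => simp at hl
    | cons g gs =>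
      have := ih gs (by simpa using hl)
      by_cases hcg : c = g <;>
        simp [mEx, mRemC, hcg, List.count_cons, this] <;> omega

lemma mG_filter (cw gw : List Char) :
    (mG cw gw).filter (fun s => s ≠ "") = (mRemG cw gw).map sOf := by
  induction cw generalizing gw with
  | nil => cases gw <;> simp [mG, mRemG]
  | cons c cs ih =>
    cases gw with
    | nil => simp [mG, mRemG]
    | cons g gs =>
      by_cases hcg : c = g <;>
        · simp [mG, mRemG, hcg]
          simpa using ih gs

lemma mK_count_empty (cw gw : List Char) : (mK cw gw).count "" = 0 := by
  induction cw generalizing gw with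
  | nil => cases gw <;> simp [mK]
  | cons c cs ih =>
    cases gw with
    | nil => simp [mK]
    | cons g gs =>
      by_cases hcg : c = g <;>
        simp [mK, List.count_cons, hcg, ih gs]

lemma map_sOf_count_empty (cr : List Char) : (cr.map sOf).count "" = 0 := by
  rw [List.count_eq_zero]
  intro h
  obtain ⟨c, _, hc⟩ := List.mem_map.1 h
  exact sOf_ne_empty c hc

lemma mK_count (cw gw : List Char) (γ : Char) (hγ : γ ≠ '-') :
    (mK cw gw).count (sOf γ) = (mRemC cw gw).count γ := by
  induction cw generalizing gw with
  | nil => cases gw <;> simp [mK, mRemC]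
  | cons c cs ih =>
    cases gw with
    | nil => simp [mK, mRemC]
    | cons g gs =>
      have hne : ¬ ("-" : String) = sOf γ := by
        intro h
        have : γ = '-' := (sOf_eq_dash_iff γ).1 h.symm
        exact hγ this
      by_cases hcg : c = g
      · simp [mK, mRemC, List.count_cons, hcg, hne, ih gs]
      · by_cases hcγ : c = γ
        · have hγg : ¬ γ = g := by rw [← hcγ]; exact hcg
          simp [mK, mRemC, List.count_cons, hcg, hcγ, hγg, ih gs]
        · have hne2 : ¬ sOf c = sOf γ := by simp [hcγ]
          simp [mK, mRemC, List.count_cons, hcg, hcγ, hne2, ih gs]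

lemma bridge (cw gw cr : List Char) (hgw : '-' ∉ gw) :
    (∑ c ∈ (mG cw gw).toFinset,
        min ((mG cw gw).count c) ((mK cw gw ++ cr.map sOf).count c))
    = ∑ γ ∈ (mRemG cw gw).toFinset,
        min ((mRemG cw gw).count γ) ((mRemC cw gw ++ cr).count γ) := by
  have hK1e : (mK cw gw ++ cr.map sOf).count "" = 0 := by
    rw [List.count_append, mK_count_empty, map_sOf_count_empty]
  have hUf : (mG cw gw).filter (fun s => s ≠ "") = (mRemG cw gw).map sOf := mG_filter cw gw
  have herase : (mG cw gw).toFinset.erase "" = ((mRemG cw gw).map sOf).toFinset := by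
    rw [← hUf]
    ext x
    simp [List.mem_filter, Finset.mem_erase, and_comm]
  have hsum1 : (∑ c ∈ (mG cw gw).toFinset,
        min ((mG cw gw).count c) ((mK cw gw ++ cr.map sOf).count c))
      = ∑ c ∈ ((mRemG cw gw).map sOf).toFinset,
        min ((mG cw gw).count c) ((mK cw gw ++ cr.map sOf).count c) := by
    by_cases hmem : ("" : String) ∈ (mG cw gw).toFinset
    · rw [← Finset.add_sum_erase _ _ hmem, herase]
      simp [hK1e]
    · rw [← herase, Finset.erase_eq_of_notMem hmem]
  have htf : ((mRemG cw gw).map sOf).toFinset = (mRemG cw gw).toFinset.image sOf := by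
    ext x; simp
  rw [hsum1, htf]
  rw [Finset.sum_image (fun x _ y _ h => sOf_inj h)]
  apply Finset.sum_congr rfl
  intro γ hγmem
  have hγg : γ ∈ gw := mem_mRemG cw gw γ (List.mem_toFinset.1 hγmem)
  have hγd : γ ≠ '-' := fun h => hgw (h ▸ hγg)
  have e1 : (mG cw gw).count (sOf γ) = (mRemG cw gw).count γ := by
    rw [← List.count_filter (p := fun s => s ≠ "") (by simp), hUf,
      List.count_map_of_injective _ sOf sOf_inj]
  have e2 : (mK cw gw ++ cr.map sOf).count (sOf γ) = (mRemC cw gw ++ cr).count γ := by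
    rw [List.count_append, List.count_append, mK_count cw gw γ hγd,
      List.count_map_of_injective _ sOf sOf_inj]
  rw [e1, e2]

lemma drop_succ_set (l : List String) (n : Nat) (v : String) :
    (l.set n v).drop (n+1) = l.drop (n+1) := by
  apply List.ext_getElem
  · simp
  · intro i h1 h2
    simp [List.getElem_drop, List.getElem_set_ne (by omega : n ≠ n + 1 + i)]

lemma loop2_eq (fuel : Nat) : ∀ (a : Int) (K G : List String) (jk : Int),
    0 ≤ a → a + fuel = 4 → 4 ≤ G.length →
    ((PySem.List.pyRange a 4 1).foldl pvStep2 (K, G, jk)).2.2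
      = jk + pvGreedy ((G.drop a.toNat).take fuel) K := by
  induction fuel with
  | zero =>
    intro a K G jk ha hsum hlen
    have ha4 : a = 4 := by omega
    subst ha4
    have : PySem.List.pyRange 4 4 1 = [] := by decide
    simp [this, pvGreedy]
  | succ f ih =>
    intro a K G jk ha hsum hlen
    have hlt : a < 4 := by omega
    rw [PySem.List.pyRange_one_cons (by omega)]
    have hidx : a.toNat < G.length := by omega
    have hget : PySem.List.pyGet? G a = some G[a.toNat] := by
      rw [PySem.List.pyGet?_of_nonneg (h := ha)]
      exact List.getElem?_eq_getElem hidx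
    have hdrop : G.drop a.toNat = G[a.toNat] :: G.drop (a.toNat + 1) :=
      (List.getElem_cons_drop hidx).symm
    have htn : (a + 1).toNat = a.toNat + 1 := by omega
    rw [List.foldl_cons]
    by_cases hc : K.contains G[a.toNat]
    · obtain ⟨j, hj⟩ := Option.isSome_iff_exists.1 ((PySem.List.index?_isSome_iff K G[a.toNat]).2 (by simpa using hc))
      have hmem : G[a.toNat] ∈ K := by simpa using hc
      have hj2 : List.idxOf? G[a.toNat] K = some j := by simpa using hj
      have hstep : pvStep2 (K, G, jk) a
          = (K.set j "-", PySem.List.pySetD G a "", jk + 1) := by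
        simp [pvStep2, hget, hmem, hj2]
      rw [hstep]
      have hsetG : PySem.List.pySetD G a "" = G.set a.toNat "" :=
        PySem.List.pySetD_of_nonneg G "" ha
      have hlen' : 4 ≤ (PySem.List.pySetD G a "").length := by
        rw [hsetG]; simpa using hlen
      rw [ih (a+1) _ _ _ (by omega) (by omega) hlen']
      have hdrop' : ((PySem.List.pySetD G a "").drop (a+1).toNat) = G.drop (a.toNat + 1) := by
        rw [hsetG, htn, drop_succ_set]
      rw [hdrop', hdrop]
      have hgreedy : pvGreedy (G[a.toNat] :: (G.drop (a.toNat+1)).take f) K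
          = pvGreedy ((G.drop (a.toNat+1)).take f) (K.set j "-") + 1 := by
        simp [pvGreedy, hmem, hj2]
      rw [List.take_succ_cons, hgreedy]
      push_cast
      ring
    · have hnmem : G[a.toNat] ∉ K := by simpa using hc
      have hstep : pvStep2 (K, G, jk) a = (K, G, jk) := by
        simp [pvStep2, hget, hnmem]
      rw [hstep, ih (a+1) _ _ _ (by omega) (by omega) hlen, htn, hdrop, List.take_succ_cons]
      have : pvGreedy (G[a.toNat] :: List.take f (List.drop (a.toNat + 1) G)) K
          = pvGreedy (List.take f (List.drop (a.toNat + 1) G)) K := by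
        simp [pvGreedy, hnmem]
      rw [this]

lemma greedy_eq_sum (gs : List String) (h : ∀ g ∈ gs, g ≠ "-") (K : List String) :
    pvGreedy gs K = ∑ c ∈ gs.toFinset, min (gs.count c) (K.count c) := by
  induction gs generalizing K with
  | nil => simp [pvGreedy]
  | cons g t ih =>
    have hg : g ≠ "-" := h g (by simp)
    have ht : ∀ x ∈ t, x ≠ "-" := fun x hx => h x (by simp [hx])
    by_cases hc : K.contains g
    · have hmem : g ∈ K := by simpa using hc
      obtain ⟨j, hj⟩ := (PySem.List.index?_isSome_iff K g).2 hmem |> Option.isSome_iff_exists.1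
      obtain ⟨pre, suf, hK, hlen, hpre⟩ := (PySem.List.index?_eq_some_iff K g j).1 hj
      have hpcnt : pre.count g = 0 := List.count_eq_zero.2 hpre
      have hset : K.set ((PySem.List.index? K g).getD 0) "-" = pre ++ "-" :: suf := by
        rw [hj, hK, ← hlen]; exact set_len_append pre suf g "-"
      rw [pvGreedy, if_pos hc, hset, ih ht]
      rw [List.toFinset_cons]
      have hterm : ∀ c ∈ t.toFinset, c ≠ g →
          min (t.count c) ((pre ++ "-" :: suf).count c) = min ((g :: t).count c) (K.count c) := by
        intro c hct hcg
        have hcd : c ≠ "-" := ht c (List.mem_toFinset.1 hct)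
        have hdc : ¬ ("-" : String) = c := fun hh => hcd hh.symm
        have hgc : ¬ g = c := fun hh => hcg hh.symm
        simp [hK, List.count_append, List.count_cons, hdc, hgc]
      by_cases hgt : g ∈ t.toFinset
      · rw [Finset.insert_eq_self.2 hgt]
        rw [← Finset.add_sum_erase _ _ hgt, ← Finset.add_sum_erase _ _ hgt]
        have hrest : ∑ c ∈ t.toFinset.erase g, min (t.count c) ((pre ++ "-" :: suf).count c)
            = ∑ c ∈ t.toFinset.erase g, min ((g :: t).count c) (K.count c) := by
          apply Finset.sum_congr rfl
          intro c hc'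
          exact hterm c (Finset.mem_of_mem_erase hc') (Finset.ne_of_mem_erase hc')
        rw [hrest]
        have hdg : ¬ ("-" : String) = g := fun hh => hg hh.symm
        have e1 : (pre ++ "-" :: suf).count g = pre.count g + suf.count g := by
          simp [List.count_append, List.count_cons, hdg]
        have e2 : K.count g = pre.count g + suf.count g + 1 := by
          simp [hK, List.count_append, List.count_cons]; omega
        have e3 : (g :: t).count g = t.count g + 1 := by simp [List.count_cons]
        have key : min (t.count g) ((pre ++ "-" :: suf).count g) + 1
            = min ((g :: t).count g) (K.count g) := by rw [e1, e2, e3]; omega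
        linarith [key]
      · rw [Finset.sum_insert hgt]
        have e2 : K.count g = suf.count g + 1 := by
          simp [hK, List.count_append, List.count_cons, hpcnt]
        have e3 : (g :: t).count g = 1 := by
          have : t.count g = 0 := List.count_eq_zero.2 (fun hh => hgt (List.mem_toFinset.2 hh))
          simp [List.count_cons, this]
        have hfg : min ((g :: t).count g) (K.count g) = 1 := by rw [e2, e3]; omega
        rw [hfg]
        have hrest : ∑ c ∈ t.toFinset, min (t.count c) ((pre ++ "-" :: suf).count c)
            = ∑ c ∈ t.toFinset, min ((g :: t).count c) (K.count c) := by
          apply Finset.sum_congr rfl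
          intro c hc'
          exact hterm c hc' (fun hh => hgt (hh ▸ hc'))
        rw [hrest]
        ring
    · have hmem : g ∉ K := by simpa using hc
      have hcnt : K.count g = 0 := List.count_eq_zero.2 hmem
      rw [pvGreedy, if_neg hc, ih ht K]
      rw [List.toFinset_cons]
      by_cases hgt : g ∈ t.toFinset
      · rw [Finset.insert_eq_self.2 hgt]
        apply Finset.sum_congr rfl
        intro c hcmem
        by_cases hcg : c = g
        · subst hcg; simp [hcnt]
        · simp [List.count_cons, Ne.symm hcg]
      · rw [Finset.sum_insert hgt]
        have : min ((g :: t).count g) (K.count g) = 0 := by simp [hcnt]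
        rw [this, zero_add]
        apply Finset.sum_congr rfl
        intro c hcmem
        have hcg : c ≠ g := by rintro rfl; exact hgt hcmem
        simp [List.count_cons, Ne.symm hcg]


lemma gf_eq (code gok : String) (hc : 4 ≤ code.toList.length) (hg : 4 ≤ gok.toList.length)
    (hd : '-' ∉ gok.toList.take 4) : pvGfA code gok = pvGfB code gok := by
  obtain ⟨cw, cr, hcs, hcwlen⟩ : ∃ cw cr, code.toList = cw ++ cr ∧ cw.length = 4 :=
    ⟨code.toList.take 4, code.toList.drop 4, (List.take_append_drop 4 code.toList).symm,
      by rw [List.length_take]; omega⟩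
  obtain ⟨gw, gr, hgs, hgwlen⟩ : ∃ gw gr, gok.toList = gw ++ gr ∧ gw.length = 4 :=
    ⟨gok.toList.take 4, gok.toList.drop 4, (List.take_append_drop 4 gok.toList).symm,
      by rw [List.length_take]; omega⟩
  have hdw : '-' ∉ gw := by
    have htk : gok.toList.take 4 = gw := by rw [hgs]; exact List.take_left' hgwlen
    rw [htk] at hd; exact hd
  have hsof : (fun c => String.ofList [c]) = sOf := rfl
  simp only [pvGfA, pvGfB, hcs, hgs, List.map_append, hsof]
  -- A, loop 1
  have h1 := loop1_gen 4 [] [] cw gw (cr.map sOf) (gr.map sOf) 0 hcwlen hgwlen (by simp) rfl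
  simp only [List.length_nil, Nat.cast_zero, List.nil_append] at h1
  rw [h1]
  -- A, loop 2
  have hGlen : 4 ≤ (mG cw gw ++ gr.map sOf).length := by
    rw [List.length_append, length_mG cw gw (by omega)]; omega
  have h2 := loop2_eq 4 0 (mK cw gw ++ cr.map sOf) (mG cw gw ++ gr.map sOf) 0 (by omega)
    (by omega) hGlen
  have htake : (((mG cw gw ++ gr.map sOf).drop (0:Int).toNat).take 4) = mG cw gw := by
    rw [show (0:Int).toNat = 0 from rfl, List.drop_zero]
    exact List.take_left' (by rw [length_mG cw gw (by omega), hcwlen])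
  rw [htake] at h2
  -- B, the single peg loop
  have h3 := loopB_gen 4 [] [] cw gw cr gr
    ((cw ++ cr).foldl (fun (d : PySem.Dict Char Int) c => d.insert c (d.getD c 0 + 1))
      PySem.Dict.empty) PySem.Dict.empty 0 hcwlen hgwlen (by simp) rfl
  simp only [List.length_nil, Nat.cast_zero, List.nil_append] at h3
  rw [h3, h2]
  refine Prod.ext (by simp) ?_
  have h0 : ((cw ++ cr).foldl (fun (d : PySem.Dict Char Int) c => d.insert c (d.getD c 0 + 1))
        PySem.Dict.empty) = PySem.Dict.counter (cw ++ cr) :=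
    PySem.Dict.foldl_insert_getD_add_one_eq_counter _
  have hgetPool : ∀ γ : Char,
      ((mEx cw gw).foldl decStep ((cw ++ cr).foldl
          (fun (d : PySem.Dict Char Int) c => d.insert c (d.getD c 0 + 1))
          PySem.Dict.empty)).getD γ 0 = (((mRemC cw gw ++ cr).count γ : Nat) : Int) := by
    intro γ
    rw [h0, getD_decStep_fold, PySem.Dict.getD_counter]
    have := count_mEx_mRemC cw gw (by omega) γ
    rw [List.count_append, List.count_append]
    push_cast
    omega
  have hG : (mRemG cw gw).foldl insStep (PySem.Dict.empty : PySem.Dict Char Int)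
      = PySem.Dict.counter (mRemG cw gw) :=
    PySem.Dict.foldl_insert_getD_add_one_eq_counter _
  -- B's juiste_kleur as a Finset sum
  have hjkB : ((mRemG cw gw).foldl insStep (PySem.Dict.empty : PySem.Dict Char Int)).items.foldl
      (fun (acc : Int) p => acc + min p.2
        (((mEx cw gw).foldl decStep ((cw ++ cr).foldl
            (fun (d : PySem.Dict Char Int) c => d.insert c (d.getD c 0 + 1))
            PySem.Dict.empty)).getD p.1 0)) 0
      = ∑ γ ∈ (mRemG cw gw).toFinset,
          min ((mRemG cw gw).count γ : Int) ((mRemC cw gw ++ cr).count γ : Int) := by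
    rw [hG, PySem.Dict.items_counter, List.foldl_map]
    simp only [PySem.Dict.getD_counter, hgetPool]
    rw [PySem.List.foldl_add]
    rw [← List.sum_toFinset _ (PySem.Set.nodup_ofList (mRemG cw gw))]
    rw [show ((PySem.Set.ofList (mRemG cw gw)).toFinset : Finset Char)
        = (mRemG cw gw).toFinset from by ext x; simp [PySem.Set.mem_ofList]]
    simp
  rw [hjkB]
  -- A's juiste_kleur via greedy_eq_sum and the bridge
  have hmem : ∀ x ∈ mG cw gw, x ≠ "-" := by
    intro x hx
    rcases mem_mG cw gw x hx with h | ⟨γ, hγ, rfl⟩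
    · rw [h]; decide
    · intro hh
      exact hdw ((sOf_eq_dash_iff γ).1 hh ▸ hγ)
  rw [greedy_eq_sum (mG cw gw) hmem (mK cw gw ++ cr.map sOf)]
  rw [bridge cw gw cr hdw]
  push_cast
  ring

lemma counter_values_pos (xs : List (Int × Int)) (v : Int)
    (hv : v ∈ (PySem.Dict.counter xs).values) : 1 ≤ v := by
  have hitems : (PySem.Dict.counter xs).values
      = (PySem.Set.ofList xs).map (fun k => ((xs.count k : Int))) := by
    show ((PySem.Dict.counter xs).items).map (·.2) = _
    rw [PySem.Dict.items_counter, List.map_map]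
    rfl
  rw [hitems] at hv
  obtain ⟨k, hk, rfl⟩ := List.mem_map.1 hv
  have hkx : k ∈ xs := (PySem.Set.mem_ofList xs k).1 hk
  have := List.count_pos_iff.2 hkx
  omega

lemma maxloop (xs : List (Int × Int)) :
    (PySem.Dict.counter xs).keys.foldl
        (fun hoogste ele => if (PySem.Dict.counter xs).getD ele 0 > hoogste
          then (PySem.Dict.counter xs).getD ele 0 else hoogste) 0
      = match PySem.List.max? (PySem.Dict.counter xs).values (fun v => v) with
        | none => 0
        | some v => v := by
  have hstep : (fun (hoogste : Int) ele => if (PySem.Dict.counter xs).getD ele 0 > hoogste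
          then (PySem.Dict.counter xs).getD ele 0 else hoogste)
      = fun hoogste ele => max hoogste ((PySem.Dict.counter xs).getD ele 0) := by
    funext h k
    rcases le_or_gt ((PySem.Dict.counter xs).getD k 0) h with hle | hlt
    · rw [if_neg (by omega), max_eq_left hle]
    · rw [if_pos (by omega), max_eq_right (by omega)]
  rw [hstep]
  have hvals : (PySem.Dict.counter xs).values
      = (PySem.Dict.counter xs).keys.map (fun k => (PySem.Dict.counter xs).getD k 0) :=
    PySem.Dict.values_eq_map_keys _ (PySem.Dict.nodup_keys_counter xs) 0
  rw [show ((PySem.Dict.counter xs).keys.foldl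
        (fun hoogste ele => max hoogste ((PySem.Dict.counter xs).getD ele 0)) 0)
      = ((PySem.Dict.counter xs).keys.map
          (fun k => (PySem.Dict.counter xs).getD k 0)).foldl max 0 from (List.foldl_map).symm]
  rw [← hvals]
  cases hv : (PySem.Dict.counter xs).values with
  | nil => simp [PySem.List.max?]
  | cons v t =>
    rw [PySem.List.max?_id_cons]
    have hv1 : 1 ≤ v := counter_values_pos xs v (by rw [hv]; simp)
    rw [List.foldl_cons, max_eq_right (by omega)]

lemma frequentielijst_eq (mogelijkheden : List String) (gok : String)
    (hpre : Pre_frequentielijst mogelijkheden gok) :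
    frequentielijst mogelijkheden gok = frequentielijst_alt mogelijkheden gok := by
  rcases hpre with hnil | ⟨hg, hm, hd⟩
  · subst hnil; rfl
  · simp only [frequentielijst, frequentielijst_alt]
    have hfold : mogelijkheden.foldl (fun (d : PySem.Dict (Int × Int) Int) element =>
          let fb := pvGfA element gok
          match d.get? fb with
          | none => d.insert fb 1
          | some v => d.insert fb (v + 1)) PySem.Dict.empty
        = mogelijkheden.foldl (fun (d : PySem.Dict (Int × Int) Int) e =>
          let fb := pvGfB e gok
          d.insert fb (d.getD fb 0 + 1)) PySem.Dict.empty := by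
      apply PySem.List.foldl_congr_mem
      intro d e he
      have hfb : pvGfA e gok = pvGfB e gok := gf_eq e gok (hm e he) hg hd
      simp only [hfb]
      cases hget : d.get? (pvGfB e gok) with
      | none =>
        simp [PySem.Dict.getD_eq_get?_getD, hget]
      | some v =>
        simp [PySem.Dict.getD_eq_get?_getD, hget]
    rw [hfold]
    have hcnt : mogelijkheden.foldl (fun (d : PySem.Dict (Int × Int) Int) e =>
          let fb := pvGfB e gok
          d.insert fb (d.getD fb 0 + 1)) PySem.Dict.empty
        = PySem.Dict.counter (mogelijkheden.map (fun e => pvGfB e gok)) := by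
      rw [← PySem.Dict.foldl_insert_getD_add_one_eq_counter, List.foldl_map]
    rw [hcnt]
    exact maxloop _

-- ===== VERDICT (by name: the statement is the Claim_ definition above) =====
theorem frequentielijst_spec : Claim_equal_frequentielijst := by
  intro mogelijkheden gok _ hpre
  unfold Spec_frequentielijst
  exact frequentielijst_eq mogelijkheden gok hpre
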